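-- pv_equiv track=rewrite | github.com/Vegvisir-Systems/srte-sampler | cli.py | custom_join
-- ===== SOURCE A (Python) =====
-- def custom_join(lst):
--     result = []
--     in_quotes = False
--     current_phrase = []
--
--     for word in lst:
--         if '"' in word:
--             if not in_quotes:
--                 current_phrase.append(word)
--                 in_quotes = True
--             else:
--                 current_phrase.append(word)
--                 in_quotes = False
--                 result.append(" ".join(current_phrase))
--                 current_phrase = []
--         else:
--             if in_quotes:
--                 current_phrase.append(word)
--             else:
--                 if " " in word:
--                     result.append(f'"{word}"')
--                 else:
--                     result.append(word)
--
--     return result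
-- ===== SOURCE B (Python) =====
-- def custom_join(lst):
--     # chunk-at-a-time: on an opening quote word, scan ahead to the matching
--     # closing quote word and emit the whole joined phrase in one step
--     out = []
--     i, n = 0, len(lst)
--     while i < n:
--         w = lst[i]
--         if '"' not in w:
--             out.append(f'"{w}"' if ' ' in w else w)
--             i += 1
--         else:
--             j = i + 1
--             while j < n and '"' not in lst[j]:
--                 j += 1
--             if j == n:
--                 break  # unmatched opening quote: drop the tail
--             out.append(" ".join(lst[i:j + 1]))
--             i = j + 1
--     return out
-- ===== Notes on version B (the rewrite author's own statement) =====
-- stated objective: alternative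
-- what changed: Replaced A's single-pass quote-flag state machine (in_quotes flag plus a current_phrase accumulator) with a chunk-at-a-time recursion that, on an opening quote word, scans ahead to the matching closing quote word and emits the whole joined phrase in one step.
import Mathlib
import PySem

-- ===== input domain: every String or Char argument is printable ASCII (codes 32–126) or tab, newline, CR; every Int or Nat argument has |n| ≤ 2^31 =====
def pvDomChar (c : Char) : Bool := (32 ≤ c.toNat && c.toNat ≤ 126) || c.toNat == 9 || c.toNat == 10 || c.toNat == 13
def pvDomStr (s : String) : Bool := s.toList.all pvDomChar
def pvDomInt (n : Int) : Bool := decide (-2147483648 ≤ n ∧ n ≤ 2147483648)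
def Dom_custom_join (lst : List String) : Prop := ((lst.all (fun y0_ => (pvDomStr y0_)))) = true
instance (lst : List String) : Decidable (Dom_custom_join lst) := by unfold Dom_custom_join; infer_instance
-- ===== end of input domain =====

-- B replaces A's single-pass quote-flag fold with a chunk-at-a-time recursion
-- (scan to the matching close quote, emit the phrase, recurse); objective: alternative decomposition.

-- ===== PORT A =====
-- loop body of A's for-loop over (result, in_quotes, current_phrase)
def pvStepA (st : List String × Bool × List String) (word : String) :
    List String × Bool × List String :=
  let result := st.1
  let in_quotes := st.2.1
  let current_phrase := st.2.2
  if PySem.Str.isIn "\"" word then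
    if !in_quotes then
      (result, true, current_phrase ++ [word])
    else
      (result ++ [PySem.Str.join " " (current_phrase ++ [word])], false, [])
  else
    if in_quotes then
      (result, in_quotes, current_phrase ++ [word])
    else
      if PySem.Str.isIn " " word then
        (result ++ ["\"" ++ word ++ "\""], in_quotes, current_phrase)
      else
        (result ++ [word], in_quotes, current_phrase)

def custom_join (lst : List String) : List String :=
  (lst.foldl pvStepA ([], false, [])).1

-- ===== PORT B =====
-- '"' not in x
def pvNoQuote (x : String) : Bool := !PySem.Str.isIn "\"" x

def custom_join_alt : List String → List String
  | [] => []
  | w :: rest =>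
    if pvNoQuote w then
      (if PySem.Str.isIn " " w then "\"" ++ w ++ "\"" else w) :: custom_join_alt rest
    else
      -- scan rest for the closing quote word
      match h : rest.dropWhile pvNoQuote with
      | [] => []  -- unmatched opening quote: drop the tail
      | c :: rest' =>
        PySem.Str.join " " (w :: rest.takeWhile pvNoQuote ++ [c]) :: custom_join_alt rest'
termination_by lst => lst.length
decreasing_by
  · simp
  · have := List.length_dropWhile_le pvNoQuote rest
    rw [h] at this
    simp at this ⊢
    omega

-- ===== PRECONDITION & SPEC =====
def Spec_custom_join (lst : List String) (out : List String) : Prop := out = custom_join_alt lst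
instance (lst : List String) (out : List String) : Decidable (Spec_custom_join lst out) := by unfold Spec_custom_join; infer_instance

-- ===== CLAIM (what is proved, stated in full; the proofs are below) =====
def Claim_equal_custom_join : Prop := ∀ (lst : List String), Dom_custom_join lst → Spec_custom_join lst (custom_join lst)

-- ===== LEMMAS AND PROOFS =====

-- what B produces from inside an open quoted phrase with accumulated words `cur`
def pvQ (cur : List String) (lst : List String) : List String :=
  match lst.dropWhile pvNoQuote with
  | [] => []
  | c :: rest' =>
    PySem.Str.join " " (cur ++ lst.takeWhile pvNoQuote ++ [c]) :: custom_join_alt rest'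

theorem pv_key : ∀ n (lst : List String), lst.length = n →
    (∀ res, (lst.foldl pvStepA (res, false, ([] : List String))).1 = res ++ custom_join_alt lst) ∧
    (∀ res cur, (lst.foldl pvStepA (res, true, cur)).1 = res ++ pvQ cur lst) := by
  intro n
  induction n using Nat.strong_induction_on with
  | _ n ih =>
    intro lst hlen
    cases lst with
    | nil =>
      constructor
      · intro res; simp [custom_join_alt]
      · intro res cur; simp [pvQ]
    | cons w rest =>
      have hrest : rest.length < n := by simp at hlen; omega
      have IH := ih rest.length hrest rest rfl
      constructor
      · intro res
        by_cases hq : PySem.Chars.isIn ['\"'] w.toList = true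
        · -- open a quote
          have h1 : List.foldl pvStepA (res, false, ([] : List String)) (w :: rest)
              = List.foldl pvStepA (res, true, [w]) rest := by
            simp [pvStepA, hq]
          rw [h1, IH.2]
          have h2 : custom_join_alt (w :: rest) = pvQ [w] rest := by
            rw [custom_join_alt]
            simp only [pvNoQuote, PySem.Str.isIn_eq]
            rw [pvQ]
            cases h : rest.dropWhile pvNoQuote with
            | nil => simp [hq]
            | cons c r' => simp [hq]
          rw [h2]
        · -- plain word
          have h1 : List.foldl pvStepA (res, false, ([] : List String)) (w :: rest)
              = List.foldl pvStepA
                  (res ++ [if PySem.Str.isIn " " w then "\"" ++ w ++ "\"" else w],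
                   false, ([] : List String)) rest := by
            by_cases hs : PySem.Chars.isIn [' '] w.toList = true <;>
              simp [pvStepA, hq, hs]
          rw [h1, IH.1]
          have h2 : custom_join_alt (w :: rest)
              = (if PySem.Str.isIn " " w then "\"" ++ w ++ "\"" else w) :: custom_join_alt rest := by
            rw [custom_join_alt]
            simp [pvNoQuote, hq]
          rw [h2]
          simp
      · intro res cur
        by_cases hq : PySem.Chars.isIn ['\"'] w.toList = true
        · -- close the quote
          have h1 : List.foldl pvStepA (res, true, cur) (w :: rest)
              = List.foldl pvStepA
                  (res ++ [PySem.Str.join " " (cur ++ [w])], false, ([] : List String)) rest := by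
            simp [pvStepA, hq]
          rw [h1, IH.1]
          have hd : (w :: rest).dropWhile pvNoQuote = w :: rest := by
            rw [List.dropWhile_cons]; simp [pvNoQuote, hq]
          have ht : (w :: rest).takeWhile pvNoQuote = [] := by
            rw [List.takeWhile_cons]; simp [pvNoQuote, hq]
          rw [pvQ, hd, ht]
          simp
        · -- extend the phrase
          have h1 : List.foldl pvStepA (res, true, cur) (w :: rest)
              = List.foldl pvStepA (res, true, cur ++ [w]) rest := by
            simp [pvStepA, hq]
          rw [h1, IH.2]
          have hd : (w :: rest).dropWhile pvNoQuote = rest.dropWhile pvNoQuote := by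
            rw [List.dropWhile_cons]; simp [pvNoQuote, hq]
          have ht : (w :: rest).takeWhile pvNoQuote = w :: rest.takeWhile pvNoQuote := by
            rw [List.takeWhile_cons]; simp [pvNoQuote, hq]
          rw [pvQ, pvQ, hd, ht]
          cases h : rest.dropWhile pvNoQuote with
          | nil => rfl
          | cons c r' => simp

-- ===== VERDICT (by name: the statement is the Claim_ definition above) =====
theorem custom_join_spec : Claim_equal_custom_join := by
  intro lst _
  unfold Spec_custom_join custom_join
  have := (pv_key lst.length lst rfl).1 []
  simpa using this
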